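-- pv_equiv track=rewrite | github.com/saketharshraj/interviews | trilogy/12-06-22/genius_gary.py | solve
-- ===== SOURCE A (Python) =====
-- def solve(A):
--     count = 0
--     num = int(A)
--     for i in range(num+1):
--         for j in range(i+1, num+1):
--             if sum(map(int, str(i))) < sum(map(int, str(j))):
--                 count += 1
--     return count % (10**9 + 7)
-- ===== SOURCE B (Python) =====
-- def solve(A):
--     MOD = 10**9 + 7
--     freq = {}  # digit-sum -> how many earlier numbers have it
--     count = 0
--     for j in range(int(A) + 1):
--         d = sum(map(int, str(j)))
--         count += sum(c for e, c in freq.items() if e < d)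
--         freq[d] = freq.get(d, 0) + 1
--     return count % MOD
-- ===== Notes on version B (the rewrite author's own statement) =====
-- stated objective: faster
-- what changed: Replaced the O(n^2) all-pairs double loop with a single pass that keeps a frequency dictionary of digit-sums already seen and, for each j, adds the number of earlier indices with a smaller digit-sum.
import Mathlib
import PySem

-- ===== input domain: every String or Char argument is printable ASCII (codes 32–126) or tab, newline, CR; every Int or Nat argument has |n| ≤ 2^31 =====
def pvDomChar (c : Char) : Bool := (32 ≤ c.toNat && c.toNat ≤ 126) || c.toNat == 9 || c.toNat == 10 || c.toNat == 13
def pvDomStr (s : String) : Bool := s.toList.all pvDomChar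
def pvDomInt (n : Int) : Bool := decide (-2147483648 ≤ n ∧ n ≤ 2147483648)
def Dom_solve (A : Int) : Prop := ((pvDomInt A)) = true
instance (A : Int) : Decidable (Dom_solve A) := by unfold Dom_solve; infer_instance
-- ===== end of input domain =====

-- B replaces A's O(n^2) double loop by one pass over 0..A with a frequency dictionary of
-- digit-sums seen so far (asymptotically faster); both return the pair count mod 10^9+7.

-- ===== PORT A =====
-- shared helper: sum(map(int, str(n))) (exact for the nonnegative n both loops pass;
-- int of a one-character digit string via PySem.Int.ofChars?)
def digsum (n : Int) : Int :=
  ((PySem.Int.toStr n).toList.map (fun c => (PySem.Int.ofChars? [c]).getD 0)).sum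

def solve (A : Int) : Int :=
  let num := A
  let count :=
    (PySem.List.pyRange 0 (num + 1) 1).foldl (fun count i =>
      (PySem.List.pyRange (i + 1) (num + 1) 1).foldl (fun count j =>
        if digsum i < digsum j then count + 1 else count) count) 0
  PySem.Int.mod count (10 ^ 9 + 7)

-- ===== PORT B =====
def solve_alt (A : Int) : Int :=
  let st :=
    (PySem.List.pyRange 0 (A + 1) 1).foldl
      (fun (st : Int × PySem.Dict Int Int) j =>
        let d := digsum j
        (st.1 + ((st.2.items.filter (fun p => p.1 < d)).map (fun p => p.2)).sum,
         st.2.insert d (st.2.getD d 0 + 1)))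
      (0, PySem.Dict.empty)
  PySem.Int.mod st.1 (10 ^ 9 + 7)

-- ===== PRECONDITION & SPEC =====
def Spec_solve (A : Int) (out : Int) : Prop := out = solve_alt A
instance (A : Int) (out : Int) : Decidable (Spec_solve A out) := by unfold Spec_solve; infer_instance

-- ===== CLAIM (what is proved, stated in full; the proofs are below) =====
def Claim_equal_solve : Prop := ∀ (A : Int), Dom_solve A → Spec_solve A (solve A)

-- ===== LEMMAS AND PROOFS =====

-- pair count of a value sequence, A's orientation: each element counts later larger elements
def acount : List Int → Int
  | [] => 0
  | v :: l => (l.countP (fun w => v < w) : Int) + acount l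

-- pair count, B's orientation: each element counts earlier smaller elements ("seen" prefix)
def bcount : List Int → List Int → Int
  | _, [] => 0
  | seen, v :: l => (seen.countP (fun e => e < v) : Int) + bcount (seen ++ [v]) l

theorem bcount_eq (l : List Int) : ∀ seen : List Int,
    bcount seen l = (l.map (fun v => ((seen.countP (fun e => e < v) : Nat) : Int))).sum + acount l := by
  induction l with
  | nil => intro seen; simp [bcount, acount]
  | cons v l ih =>
    intro seen
    have h1 : ∀ w : Int, ((seen ++ [v]).countP (fun e => e < w) : Int)
        = (seen.countP (fun e => e < w) : Int) + (if (v < w : Prop) then (1:Int) else 0) := by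
      intro w
      rw [List.countP_append]
      by_cases h : v < w <;> simp [h]
    calc bcount seen (v :: l)
        = (seen.countP (fun e => e < v) : Int) + bcount (seen ++ [v]) l := rfl
      _ = (seen.countP (fun e => e < v) : Int)
          + ((l.map (fun w => (((seen ++ [v]).countP (fun e => e < w) : Nat) : Int))).sum + acount l) := by
            rw [ih]
      _ = (seen.countP (fun e => e < v) : Int)
          + ((l.map (fun w => (seen.countP (fun e => e < w) : Int)
                + (if (v < w : Prop) then (1:Int) else 0))).sum + acount l) := by
            simp only [h1]
      _ = ((v :: l).map (fun w => ((seen.countP (fun e => e < w) : Nat) : Int))).sum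
          + acount (v :: l) := by
            rw [PySem.List.sum_map_add_int l (fun w => (seen.countP (fun e => e < w) : Int))
              (fun w => if (v < w : Prop) then (1:Int) else 0)]
            have := PySem.List.sum_map_ite_one_zero (fun w => decide (v < w)) l
            simp only [decide_eq_true_eq] at this
            rw [this]
            simp only [List.map_cons, List.sum_cons, acount]
            ring

theorem bcount_nil_seen (l : List Int) : bcount [] l = acount l := by
  rw [bcount_eq]
  simp

-- sum of the counter's multiplicities over keys below d = countP of the underlying list
theorem counter_filter_sum (seen : List Int) (d : Int) :
    ((((PySem.Dict.counter seen).items.filter (fun p => p.1 < d)).map (fun p => p.2)).sum)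
      = ((seen.countP (fun e => e < d) : Nat) : Int) := by
  rw [PySem.Dict.items_counter]
  rw [List.filter_map]
  rw [List.map_map]
  simp only [Function.comp_def]
  have hperm : (PySem.Set.ofList seen).Perm seen.dedup := by
    rw [List.perm_ext_iff_of_nodup (PySem.Set.nodup_ofList seen) seen.nodup_dedup]
    intro a
    rw [PySem.Set.mem_ofList, List.mem_dedup]
  have hperm2 := (hperm.filter (fun k => decide (k < d))).map
    (fun k => ((seen.count k : Nat) : Int))
  rw [hperm2.sum_eq]
  have := List.sum_map_count_dedup_filter_eq_countP (fun k => decide (k < d)) seen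
  have hcast : ((seen.dedup.filter (fun k => decide (k < d))).map
      (fun k => ((seen.count k : Nat) : Int))).sum
      = (((seen.dedup.filter (fun k => decide (k < d))).map (fun k => seen.count k)).sum : Int) := by
    push_cast
    simp [Function.comp_def]
  rw [hcast, this]

theorem counter_snoc (seen : List Int) (x : Int) :
    PySem.Dict.counter (seen ++ [x])
      = (PySem.Dict.counter seen).insert x ((PySem.Dict.counter seen).getD x 0 + 1) := by
  rw [← PySem.Dict.foldl_insert_getD_add_one_eq_counter (seen ++ [x]),
      ← PySem.Dict.foldl_insert_getD_add_one_eq_counter seen]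
  rw [List.foldl_append]
  rfl

-- the invariant of B's single pass
theorem bside (l : List Int) : ∀ (c : Int) (seen : List Int),
    l.foldl
      (fun (st : Int × PySem.Dict Int Int) j =>
        let d := digsum j
        (st.1 + ((st.2.items.filter (fun p => p.1 < d)).map (fun p => p.2)).sum,
         st.2.insert d (st.2.getD d 0 + 1)))
      (c, PySem.Dict.counter seen)
    = (c + bcount seen (l.map digsum), PySem.Dict.counter (seen ++ l.map digsum)) := by
  induction l with
  | nil => intro c seen; simp [bcount]
  | cons j l ih =>
    intro c seen
    rw [List.foldl_cons]
    show l.foldl _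
      (c + ((((PySem.Dict.counter seen).items.filter (fun p => p.1 < digsum j)).map (fun p => p.2)).sum),
       (PySem.Dict.counter seen).insert (digsum j) ((PySem.Dict.counter seen).getD (digsum j) 0 + 1)) = _
    rw [counter_filter_sum seen (digsum j), ← counter_snoc seen (digsum j)]
    rw [ih (c + ((seen.countP (fun e => e < digsum j) : Nat) : Int)) (seen ++ [digsum j])]
    simp [bcount, add_assoc, List.append_assoc]

-- A's double loop computes acount of the digit-sum sequence
theorem aside : ∀ (n : Nat) (a b c0 : Int), (b - a).toNat = n →
    (PySem.List.pyRange a b 1).foldl (fun count i =>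
      (PySem.List.pyRange (i + 1) b 1).foldl (fun count j =>
        if digsum i < digsum j then count + 1 else count) count) c0
    = c0 + acount ((PySem.List.pyRange a b 1).map digsum) := by
  intro n
  induction n with
  | zero =>
    intro a b c0 h
    have hle : b ≤ a := by omega
    rw [PySem.List.pyRange_one_eq_nil hle]
    simp [acount]
  | succ n ih =>
    intro a b c0 h
    have hlt : a < b := by omega
    rw [PySem.List.pyRange_one_cons hlt]
    rw [List.foldl_cons]
    have hinner := PySem.List.foldl_count_if (fun j => decide (digsum a < digsum j))
      (PySem.List.pyRange (a + 1) b 1) c0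
    simp only [decide_eq_true_eq] at hinner
    rw [hinner]
    rw [ih (a + 1) b _ (by omega)]
    simp only [List.map_cons, acount, List.countP_map]
    have : (List.countP ((fun w => decide (digsum a < w)) ∘ digsum) (PySem.List.pyRange (a + 1) b 1))
        = (List.countP (fun j => decide (digsum a < digsum j)) (PySem.List.pyRange (a + 1) b 1)) := rfl
    rw [this]
    ring

-- ===== VERDICT (by name: the statement is the Claim_ definition above) =====
theorem solve_spec : Claim_equal_solve := by
  intro A _
  unfold Spec_solve solve solve_alt
  have hA := aside (A + 1 - 0).toNat 0 (A + 1) 0 rfl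
  have hB := bside (PySem.List.pyRange 0 (A + 1) 1) 0 []
  have hempty : (PySem.Dict.counter ([] : List Int)) = (PySem.Dict.empty : PySem.Dict Int Int) := rfl
  rw [← hempty]
  simp only [hA, hB, bcount_nil_seen, List.nil_append, zero_add]
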